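-- pv_equiv track=rewrite | github.com/achen272/csc201spring2016 | Chen-Program03-Part2.py | dna_Length
-- ===== SOURCE A (Python) =====
-- def dna_Length(dna_Frag,gene):
--         count = 0
--         maxMatch = 0
--         if len(dna_Frag) > len(gene):
--             small = gene
--             big = dna_Frag
--         else:
--            small = dna_Frag
--            big = gene
--
--         for i in range(len(small)):
--                 if small[i] == big[i]:
--                         count += 1
--                 else:
--                         count = 0
--                 if count > maxMatch:
--                         maxMatch = count
--         return maxMatch
-- ===== SOURCE B (Python) =====
-- def dna_Length(dna_Frag, gene):
--     # mark each aligned position, then the longest run of marks is the answer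
--     marks = ''.join('=' if a == b else ' ' for a, b in zip(dna_Frag, gene))
--     return max(len(run) for run in marks.split(' '))
-- ===== Notes on version B (the rewrite author's own statement) =====
-- stated objective: idiomatic
-- what changed: Replaces the running counter-and-reset index loop (with its explicit small/big selection) by a two-phase decomposition: zip truncates to the aligned prefix, a match-mark string is built, and the answer is the length of the longest piece after splitting on mismatch marks.
import Mathlib
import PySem

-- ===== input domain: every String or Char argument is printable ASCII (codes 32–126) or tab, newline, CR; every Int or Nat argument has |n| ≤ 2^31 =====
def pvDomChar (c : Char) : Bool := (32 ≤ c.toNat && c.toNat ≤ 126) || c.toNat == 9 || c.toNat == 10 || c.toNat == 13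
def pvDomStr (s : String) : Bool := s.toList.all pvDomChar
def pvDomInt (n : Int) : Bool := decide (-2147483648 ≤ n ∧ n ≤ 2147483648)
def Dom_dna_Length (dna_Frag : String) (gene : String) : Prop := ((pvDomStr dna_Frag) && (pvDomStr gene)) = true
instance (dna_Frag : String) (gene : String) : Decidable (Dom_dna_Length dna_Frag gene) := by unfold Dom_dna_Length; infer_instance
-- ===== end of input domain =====

-- B replaces A's running counter-and-reset index loop by a two-phase decomposition:
-- mark the aligned matches over the zipped prefix, then take the longest piece after
-- splitting the mark string on mismatches (objective: idiomatic; same O(n) cost).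

-- ===== PORT A =====
def dna_Length (dna_Frag : String) (gene : String) : Int :=
  let count : Int := 0
  let maxMatch : Int := 0
  let sb := if PySem.Str.len dna_Frag > PySem.Str.len gene
            then (gene.toList, dna_Frag.toList) else (dna_Frag.toList, gene.toList)
  let small := sb.1
  let big := sb.2
  let r := (PySem.List.pyRange 0 ((small.length : Int)) 1).foldl
    (fun (st : Int × Int) i =>
      let count := if PySem.List.pyGetD small i ' ' == PySem.List.pyGetD big i ' '
                   then st.1 + 1 else (0 : Int)
      let maxMatch := if count > st.2 then count else st.2
      (count, maxMatch)) (count, maxMatch)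
  r.2

-- ===== PORT B =====
def dna_Length_alt (dna_Frag : String) (gene : String) : Int :=
  let marks : List Char :=
    (dna_Frag.toList.zip gene.toList).map (fun p => if p.1 == p.2 then '=' else ' ')
  let lens := (PySem.Chars.splitOn marks [' ']).map (fun run => (run.length : Int))
  -- max over the split pieces; split always yields at least one piece, so the
  -- none branch is unreachable (Python's max never sees an empty sequence here)
  match PySem.List.max? lens (fun x => x) with
  | some m => m
  | none => 0

-- ===== PRECONDITION & SPEC =====
def Spec_dna_Length (dna_Frag : String) (gene : String) (out : Int) : Prop := out = dna_Length_alt dna_Frag gene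
instance (dna_Frag : String) (gene : String) (out : Int) : Decidable (Spec_dna_Length dna_Frag gene out) := by unfold Spec_dna_Length; infer_instance

-- ===== CLAIM (what is proved, stated in full; the proofs are below) =====
def Claim_equal_dna_Length : Prop := ∀ (dna_Frag : String) (gene : String), Dom_dna_Length dna_Frag gene → Spec_dna_Length dna_Frag gene (dna_Length dna_Frag gene)

-- ===== LEMMAS AND PROOFS =====

-- A's loop step, abstracted over the boolean "characters match at this position"
def stepM (st : Int × Int) (b : Bool) : Int × Int :=
  let c := if b then st.1 + 1 else (0 : Int)
  (c, if c > st.2 then c else st.2)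

-- the list of piece lengths of a boolean match list, the first piece seeded at c
def piecesFrom (c : Int) : List Bool → List Int
  | [] => [c]
  | true :: t => piecesFrom (c + 1) t
  | false :: t => c :: piecesFrom 0 t

-- splitting a char list on ' ': first piece and remaining pieces
def sp : List Char → List Char × List (List Char)
  | [] => ([], [])
  | c :: t =>
    let r := sp t
    if c = ' ' then ([], r.1 :: r.2) else (c :: r.1, r.2)

def mark (b : Bool) : Char := if b then '=' else ' '

theorem charBeqComm (a b : Char) : (a == b) = (b == a) := by
  by_cases h : a = b
  · subst h; rfl
  · simp [h, Ne.symm h]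

theorem go_spec (fuel : Nat) (l cur : List Char) (acc : List (List Char))
    (h : l.length < fuel) :
    PySem.Chars.splitOn.go [' '] fuel l cur acc
      = acc.reverse ++ ((cur.reverse ++ (sp l).1) :: (sp l).2) := by
  induction fuel generalizing l cur acc with
  | zero => omega
  | succ n ih =>
    cases l with
    | nil => simp [PySem.Chars.splitOn.go, sp]
    | cons c rest =>
      simp only [PySem.Chars.splitOn.go, List.isPrefixOf, Bool.and_true]
      by_cases hc : c = ' '
      · subst hc
        simp only [BEq.rfl, if_pos, List.length_singleton, List.drop_succ_cons,
          List.drop_zero]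
        rw [ih rest [] (cur.reverse :: acc) (by simpa using h)]
        simp [sp]
      · have hb : (' ' == c) = false := by simp [Ne.symm hc]
        rw [hb]
        simp only [Bool.false_eq_true, if_false]
        rw [ih rest (c :: cur) acc (by simpa using h)]
        simp [sp, hc]

theorem splitOn_spec (l : List Char) :
    PySem.Chars.splitOn l [' '] = ((sp l).1 :: (sp l).2) := by
  show PySem.Chars.splitOn.go [' '] (l.length + 1) l [] [] = _
  rw [go_spec (l.length + 1) l [] [] (by omega)]
  simp

theorem sp_map_mark (ms : List Bool) (c : Int) :
    piecesFrom c ms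
      = (c + ((sp (ms.map mark)).1.length : Int))
        :: (sp (ms.map mark)).2.map (fun r => (r.length : Int)) := by
  induction ms generalizing c with
  | nil => simp [piecesFrom, sp]
  | cons b t ih =>
    cases b with
    | true =>
      simp only [piecesFrom, List.map_cons, mark, if_pos]
      rw [ih (c + 1)]
      have hne : ('=' : Char) ≠ ' ' := by decide
      simp only [sp, hne, if_false, List.length_cons]
      congr 1
      push_cast; ring
    | false =>
      simp only [piecesFrom, List.map_cons, mark, Bool.false_eq_true, if_false]
      rw [ih 0]
      simp [sp]

theorem absorb (ms : List Bool) (c m x : Int) (h : x ≤ c) :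
    (piecesFrom c ms).foldl max (max m x) = (piecesFrom c ms).foldl max m := by
  induction ms generalizing c m x with
  | nil =>
    simp only [piecesFrom, List.foldl_cons, List.foldl_nil, max_def]
    split_ifs <;> omega
  | cons b t ih =>
    cases b with
    | true => simpa [piecesFrom] using ih (c + 1) m x (by omega)
    | false =>
      simp only [piecesFrom, List.foldl_cons]
      have hmx : max (max m x) c = max m c := by
        simp only [max_def]; split_ifs <;> omega
      rw [hmx]

theorem loop_pieces (ms : List Bool) (c m : Int) (h0 : 0 ≤ c) (h : c ≤ m) :
    (ms.foldl stepM (c, m)).2 = (piecesFrom c ms).foldl max m := by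
  induction ms generalizing c m with
  | nil =>
    simp only [piecesFrom, List.foldl_nil, List.foldl_cons, max_def]
    split_ifs <;> omega
  | cons b t ih =>
    cases b with
    | true =>
      simp only [List.foldl_cons, stepM, if_pos, piecesFrom]
      have hm : (if c + 1 > m then c + 1 else m) = max m (c + 1) := by
        simp only [max_def]; split_ifs <;> omega
      rw [hm, ih (c + 1) (max m (c + 1)) (by omega) (le_max_right _ _)]
      exact absorb t (c + 1) m (c + 1) le_rfl
    | false =>
      simp only [List.foldl_cons, stepM, Bool.false_eq_true, if_false, piecesFrom]
      have hm : (if (0 : Int) > m then (0 : Int) else m) = m := by omega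
      rw [hm, ih 0 m le_rfl (by omega)]
      simp only [max_eq_left h]

-- A's indexed loop over small/big is the abstract loop over the boolean match list
theorem sideA (small big : List Char) (h : small.length ≤ big.length) :
    ((PySem.List.pyRange 0 ((small.length : Int)) 1).foldl
      (fun (st : Int × Int) i =>
        let c := if PySem.List.pyGetD small i ' ' == PySem.List.pyGetD big i ' '
                 then st.1 + 1 else (0 : Int)
        (c, if c > st.2 then c else st.2)) ((0 : Int), (0 : Int))).2
      = ((List.zipWith (· == ·) small big).foldl stepM ((0 : Int), (0 : Int))).2 := by
  set ms := List.zipWith (· == ·) small big with hms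
  have hlen : ms.length = small.length := by
    simp only [hms, List.length_zipWith]; omega
  have hcg : (PySem.List.pyRange 0 ((small.length : Int)) 1).foldl
      (fun (st : Int × Int) i =>
        let c := if PySem.List.pyGetD small i ' ' == PySem.List.pyGetD big i ' '
                 then st.1 + 1 else (0 : Int)
        (c, if c > st.2 then c else st.2)) ((0 : Int), (0 : Int))
      = (PySem.List.pyRange 0 ((ms.length : Int)) 1).foldl
      (fun (st : Int × Int) i => stepM st (PySem.List.pyGetD ms i false)) ((0 : Int), (0 : Int)) := by
    rw [hlen]
    apply PySem.List.foldl_congr_mem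
    intro st i hi
    have hi' : 0 ≤ i ∧ i < (small.length : Int) := by
      simpa using (PySem.List.mem_pyRange_one.mp hi)
    have hks : i < (small.length : Int) := hi'.2
    have hkb : i < (big.length : Int) := by exact_mod_cast lt_of_lt_of_le hks (by exact_mod_cast h)
    have hkm : i < (ms.length : Int) := by rw [hlen]; exact hks
    have hkn : i.toNat < ms.length := by omega
    rw [PySem.List.pyGetD_eq_getElem small ' ' hi'.1 hks,
        PySem.List.pyGetD_eq_getElem big ' ' hi'.1 hkb,
        PySem.List.pyGetD_eq_getElem ms false hi'.1 hkm]
    simp [hms, stepM, List.getElem_zipWith]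
  rw [hcg]
  congr 1
  exact PySem.List.foldl_pyRange_zero_pyGetD' ms false _ _

theorem dna_Length_eq_pieces (dna_Frag gene : String) :
    dna_Length dna_Frag gene
      = (piecesFrom 0 (List.zipWith (· == ·) dna_Frag.toList gene.toList)).foldl max 0 := by
  set f := dna_Frag.toList with hf
  set g := gene.toList with hg
  by_cases hgt : PySem.Str.len dna_Frag > PySem.Str.len gene
  · have hle : g.length ≤ f.length := by
      have := hgt
      rw [PySem.Str.len_eq, PySem.Str.len_eq] at this
      rw [← hf, ← hg] at this
      omega
    have h1 : dna_Length dna_Frag gene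
        = ((List.zipWith (· == ·) g f).foldl stepM ((0 : Int), (0 : Int))).2 := by
      unfold dna_Length
      rw [if_pos hgt]
      exact sideA g f hle
    rw [h1, List.zipWith_comm_of_comm charBeqComm (l := g) (l' := f),
        loop_pieces _ 0 0 le_rfl le_rfl]
  · have h1 : dna_Length dna_Frag gene
        = ((List.zipWith (· == ·) f g).foldl stepM ((0 : Int), (0 : Int))).2 := by
      unfold dna_Length
      rw [if_neg hgt]
      apply sideA f g
      have := hgt
      rw [PySem.Str.len_eq, PySem.Str.len_eq] at this
      rw [← hf, ← hg] at this
      omega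
    rw [h1, loop_pieces _ 0 0 le_rfl le_rfl]

theorem alt_eq_pieces (dna_Frag gene : String) :
    dna_Length_alt dna_Frag gene
      = (piecesFrom 0 (List.zipWith (· == ·) dna_Frag.toList gene.toList)).foldl max 0 := by
  have hmarks : (dna_Frag.toList.zip gene.toList).map (fun p => if p.1 == p.2 then '=' else ' ')
      = (List.zipWith (· == ·) dna_Frag.toList gene.toList).map mark := by
    rw [List.map_zip_eq_zipWith, List.map_zipWith]
    rfl
  simp only [dna_Length_alt, hmarks, splitOn_spec, List.map_cons, PySem.List.max?_id_cons]
  rw [sp_map_mark _ 0]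
  simp only [List.foldl_cons]
  congr 1
  simp only [max_def]; split_ifs <;> omega

-- ===== VERDICT (by name: the statement is the Claim_ definition above) =====
theorem dna_Length_spec : Claim_equal_dna_Length := by
  intro dna_Frag gene _
  unfold Spec_dna_Length
  rw [dna_Length_eq_pieces, alt_eq_pieces]
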